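-- pv_equiv track=rewrite | github.com/human02/Interview-Preparation | dsa/arrays/flip_monotonic.py | flipToMonotonic_optimal
-- ===== SOURCE A (Python) =====
-- def flipToMonotonic_optimal(arr):
--     """
--     Idea:
--     - We are re-checking the arr for 1s and 0s at each split again.
--     - We dont need to do it.
--     - Prefix will store how many 1s we have encountered at each split pt.
--     - Maintain a running count of 1s and a var for flips.
--     - Iterate through each num:
--         - Add to 1s count if 1 is seen
--         - If 0 is seen:
--             - either we flip it, flip +=1
--             - or we keep it and flip all the 1s encountered yet
--         - We find the minimum of these two operation
--     """
--     onesCount = 0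
--     flips = 0  # flip is a potential flip if 0 found later
--
--     for num in arr:
--         if num == 1:
--             onesCount += 1
--         else:  # 0 found
--             # flip this 0
--             # keep this 0 and flip all prev 1s
--             flips = min(flips + 1, onesCount)
--     return flips
-- ===== SOURCE B (Python) =====
-- def flipToMonotonic_optimal(arr):
--     # Enumerate split points with precomputed counts instead of the online DP.
--     total_zeros = sum(1 for x in arr if x != 1)
--     best = total_zeros  # split before position 0: flip every zero
--     ones = 0
--     k = 0
--     for x in arr:
--         if x == 1:
--             ones += 1
--         k += 1
--         # cost of splitting right after position k: ones in prefix + zeros in suffix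
--         best = min(best, 2 * ones - k + total_zeros)
--     return best
-- ===== Notes on version B (the rewrite author's own statement) =====
-- stated objective: alternative
-- what changed: Replaces the online DP recurrence flips=min(flips+1,onesCount) by an explicit enumeration of split positions: precompute the total zero count, then scan once taking the minimum of the closed-form split cost 2*onesPrefix - k + totalZeros.
import Mathlib
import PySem

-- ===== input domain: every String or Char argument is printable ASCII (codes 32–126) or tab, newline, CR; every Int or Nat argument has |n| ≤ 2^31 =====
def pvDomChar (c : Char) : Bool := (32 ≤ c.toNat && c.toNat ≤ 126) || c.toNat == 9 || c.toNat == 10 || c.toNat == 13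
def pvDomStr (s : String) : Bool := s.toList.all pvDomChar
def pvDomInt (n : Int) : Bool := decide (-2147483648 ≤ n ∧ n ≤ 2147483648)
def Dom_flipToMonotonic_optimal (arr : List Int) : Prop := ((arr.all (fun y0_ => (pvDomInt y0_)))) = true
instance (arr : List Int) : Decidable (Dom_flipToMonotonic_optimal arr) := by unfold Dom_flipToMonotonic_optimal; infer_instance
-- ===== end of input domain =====

-- B enumerates split points with precomputed zero counts instead of A's online DP; same O(n) cost (objective: alternative).

-- ===== PORT A =====
-- A's loop: state (onesCount, flips), per element update as in the Python.
def pvAFold (arr : List Int) (onesCount flips : Int) : Int :=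
  match arr with
  | [] => flips
  | num :: rest =>
    if num = 1 then pvAFold rest (onesCount + 1) flips
    else pvAFold rest onesCount (min (flips + 1) onesCount)

def flipToMonotonic_optimal (arr : List Int) : Int := pvAFold arr 0 0

-- ===== PORT B =====
-- total_zeros = sum(1 for x in arr if x != 1)
def pvZeros (arr : List Int) : Int :=
  match arr with
  | [] => 0
  | x :: rest => (if x ≠ 1 then 1 else 0) + pvZeros rest

-- B's loop: state (ones, k, best); per element the split-cost candidate 2*ones - k + totalZeros.
def pvBFold (arr : List Int) (ones k totalZeros best : Int) : Int :=
  match arr with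
  | [] => best
  | x :: rest =>
    let ones' := if x = 1 then ones + 1 else ones
    pvBFold rest ones' (k + 1) totalZeros (min best (2 * ones' - (k + 1) + totalZeros))

def flipToMonotonic_optimal_alt (arr : List Int) : Int :=
  let totalZeros := pvZeros arr
  pvBFold arr 0 0 totalZeros totalZeros

-- ===== PRECONDITION & SPEC =====
def Spec_flipToMonotonic_optimal (arr : List Int) (out : Int) : Prop := out = flipToMonotonic_optimal_alt arr
instance (arr : List Int) (out : Int) : Decidable (Spec_flipToMonotonic_optimal arr out) := by unfold Spec_flipToMonotonic_optimal; infer_instance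

-- ===== CLAIM (what is proved, stated in full; the proofs are below) =====
def Claim_equal_flipToMonotonic_optimal : Prop := ∀ (arr : List Int), Dom_flipToMonotonic_optimal arr → Spec_flipToMonotonic_optimal arr (flipToMonotonic_optimal arr)

-- ===== LEMMAS AND PROOFS =====

theorem pvBFold_cons (x : Int) (rest : List Int) (o k Z b : Int) :
    pvBFold (x :: rest) o k Z b =
      pvBFold rest (if x = 1 then o + 1 else o) (k + 1) Z
        (min b (2 * (if x = 1 then o + 1 else o) - (k + 1) + Z)) := rfl

-- Invariant: B's running minimum equals A's flips plus the zeros still to come.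
theorem pvKey (arr : List Int) : ∀ (o k Z f : Int), f ≤ o → Z - pvZeros arr = k - o →
    pvBFold arr o k Z (f + pvZeros arr) = pvAFold arr o f := by
  induction arr with
  | nil => intro o k Z f _ _; simp [pvBFold, pvAFold, pvZeros]
  | cons x rest ih =>
    intro o k Z f hf hZ
    by_cases hx : x = 1
    · have hz : pvZeros (x :: rest) = pvZeros rest := by simp [pvZeros, hx]
      rw [hz] at hZ ⊢
      rw [pvBFold_cons, if_pos hx]
      have hc : 2*(o+1) - (k+1) + Z = (o+1) + pvZeros rest := by omega
      have hm : min (f + pvZeros rest) (2*(o+1) - (k+1) + Z) = f + pvZeros rest := by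
        rw [hc]; omega
      rw [hm, ih (o+1) (k+1) Z f (by omega) (by omega)]
      simp [pvAFold, hx]
    · have hz : pvZeros (x :: rest) = 1 + pvZeros rest := by simp [pvZeros, hx]
      rw [hz] at hZ
      rw [pvBFold_cons, if_neg hx]
      have hc : 2*o - (k+1) + Z = o + pvZeros rest := by omega
      have hm : min (f + pvZeros (x :: rest)) (2*o - (k+1) + Z)
            = min (f + 1) o + pvZeros rest := by
        rw [hc, hz]
        rcases le_total (f + 1) o with h | h
        · rw [min_eq_left (by omega), min_eq_left (by omega)]; ring
        · rw [min_eq_right (by omega), min_eq_right (by omega)]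
      rw [hm, ih o (k+1) Z (min (f+1) o) (by omega) (by omega)]
      simp [pvAFold, hx]

-- ===== VERDICT (by name: the statement is the Claim_ definition above) =====
theorem flipToMonotonic_optimal_spec : Claim_equal_flipToMonotonic_optimal := by
  intro arr _
  unfold Spec_flipToMonotonic_optimal flipToMonotonic_optimal flipToMonotonic_optimal_alt
  have := pvKey arr 0 0 (pvZeros arr) 0 le_rfl (by omega)
  simpa using this.symm
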